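-- pv_equiv track=rewrite | github.com/Dummiesman/PKGImportExport | import_pkg.py | triangle_strip_to_list
-- ===== SOURCE A (Python) =====
-- def triangle_strip_to_list(strip,clockwise):
--     triangle_list = []
--     for v in range(2,len(strip)):
--         if clockwise:
--             triangle_list.extend([strip[v-2], strip[v], strip[v-1]])
--         else:
--             triangle_list.extend([strip[v], strip[v-2], strip[v-1]])
--         clockwise = not clockwise
--     return triangle_list
-- ===== SOURCE B (Python) =====
-- def triangle_strip_to_list(strip, clockwise):
--     # Pairwise consumption of the strip: each step advances two vertices and
--     # emits two triangles whose windings are fixed by their position in the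
--     # pair, so no mutable winding flag is threaded through the loop.
--     def tri_cw(a, b, c):
--         return [a, c, b]
--
--     def tri_ccw(a, b, c):
--         return [c, a, b]
--
--     first, second = (tri_cw, tri_ccw) if clockwise else (tri_ccw, tri_cw)
--
--     out = []
--     i = 0
--     n = len(strip)
--     while i + 3 < n:  # a full pair of triangles remains
--         out += (first(strip[i], strip[i + 1], strip[i + 2])
--                 + second(strip[i + 1], strip[i + 2], strip[i + 3]))
--         i += 2
--     if i + 3 == n:  # one trailing triangle
--         out += first(strip[i], strip[i + 1], strip[i + 2])
--     return out
-- ===== Notes on version B (the rewrite author's own statement) =====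
-- stated objective: alternative
-- what changed: Replaces the per-index loop that toggles a mutable clockwise flag each iteration by a loop that advances two vertices per step and emits a fixed-orientation pair of triangles (plus an optional trailing triangle), so no winding state is threaded through the iteration.
import Mathlib
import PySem

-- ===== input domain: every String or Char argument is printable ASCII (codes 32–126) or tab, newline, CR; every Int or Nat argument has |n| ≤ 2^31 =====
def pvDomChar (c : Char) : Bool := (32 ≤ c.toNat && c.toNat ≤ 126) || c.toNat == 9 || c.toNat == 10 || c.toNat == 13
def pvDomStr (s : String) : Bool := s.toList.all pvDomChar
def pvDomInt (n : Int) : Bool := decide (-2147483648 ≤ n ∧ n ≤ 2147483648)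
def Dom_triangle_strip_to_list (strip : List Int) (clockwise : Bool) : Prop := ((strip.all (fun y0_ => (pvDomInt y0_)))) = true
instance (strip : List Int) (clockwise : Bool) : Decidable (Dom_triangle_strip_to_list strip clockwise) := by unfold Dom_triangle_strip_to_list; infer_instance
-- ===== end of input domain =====

-- B replaces A's toggle-flag indexed loop by a recursion consuming two vertices per step with fixed per-position windings (same cost, no mutable winding state).


-- ===== PORT A =====
-- literal port: for v in range(2, len(strip)), extend by a triple chosen by the toggled flag
def triangle_strip_to_list (strip : List Int) (clockwise : Bool) : List Int :=
  ((PySem.List.pyRange 2 (strip.length : Int) 1).foldl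
    (fun (st : List Int × Bool) v =>
      if st.2 then
        (st.1 ++ [PySem.List.pyGetD strip (v - 2) 0, PySem.List.pyGetD strip v 0,
                  PySem.List.pyGetD strip (v - 1) 0], !st.2)
      else
        (st.1 ++ [PySem.List.pyGetD strip v 0, PySem.List.pyGetD strip (v - 2) 0,
                  PySem.List.pyGetD strip (v - 1) 0], !st.2))
    ([], clockwise)).1

-- ===== PORT B =====
-- Source B's tri_cw / tri_ccw
def pvTriCw (a b c : Int) : List Int := [a, c, b]
def pvTriCcw (a b c : Int) : List Int := [c, a, b]
-- Source B's while loop: advance i by 2, emitting a fixed-winding pair of triangles per step,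
-- then the optional trailing triangle (i + 3 == n)
def pvGoLoop (first second : Int → Int → Int → List Int) (strip : List Int) (out : List Int) (i : Nat) : List Int :=
  if i + 3 < strip.length then
    pvGoLoop first second strip
      (out ++ first (PySem.List.pyGetD strip (i : Int) 0) (PySem.List.pyGetD strip ((i + 1 : Nat) : Int) 0)
                    (PySem.List.pyGetD strip ((i + 2 : Nat) : Int) 0)
           ++ second (PySem.List.pyGetD strip ((i + 1 : Nat) : Int) 0) (PySem.List.pyGetD strip ((i + 2 : Nat) : Int) 0)
                     (PySem.List.pyGetD strip ((i + 3 : Nat) : Int) 0))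
      (i + 2)
  else if i + 3 = strip.length then
    out ++ first (PySem.List.pyGetD strip (i : Int) 0) (PySem.List.pyGetD strip ((i + 1 : Nat) : Int) 0)
                 (PySem.List.pyGetD strip ((i + 2 : Nat) : Int) 0)
  else out
termination_by strip.length - i

def triangle_strip_to_list_alt (strip : List Int) (clockwise : Bool) : List Int :=
  if clockwise then pvGoLoop pvTriCw pvTriCcw strip [] 0 else pvGoLoop pvTriCcw pvTriCw strip [] 0

-- ===== PRECONDITION & SPEC =====
def Spec_triangle_strip_to_list (strip : List Int) (clockwise : Bool) (out : List Int) : Prop := out = triangle_strip_to_list_alt strip clockwise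
instance (strip : List Int) (clockwise : Bool) (out : List Int) : Decidable (Spec_triangle_strip_to_list strip clockwise out) := by unfold Spec_triangle_strip_to_list; infer_instance

-- ===== CLAIM (what is proved, stated in full; the proofs are below) =====
def Claim_equal_triangle_strip_to_list : Prop := ∀ (strip : List Int) (clockwise : Bool), Dom_triangle_strip_to_list strip clockwise → Spec_triangle_strip_to_list strip clockwise (triangle_strip_to_list strip clockwise)

-- ===== LEMMAS AND PROOFS =====

-- drop-2 recursion over the strip (proof helper: the loop above computes this)
def pvGo (first second : Int → Int → Int → List Int) : List Int → List Int
  | a :: b :: c :: d :: rest => first a b c ++ second b c d ++ pvGo first second (c :: d :: rest)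
  | [a, b, c] => first a b c
  | _ => []

-- the index loop computes pvGo on the corresponding suffix
theorem goLoop_eq_go (first second : Int → Int → Int → List Int) (strip : List Int) :
    ∀ (i : Nat) (out : List Int), pvGoLoop first second strip out i = out ++ pvGo first second (strip.drop i) := by
  intro i
  generalize hg : strip.length - i = fuel
  induction fuel using Nat.strong_induction_on generalizing i with
  | _ fuel ih =>
    intro out
    rw [pvGoLoop]
    by_cases h1 : i + 3 < strip.length
    · rw [if_pos h1]
      rw [ih (strip.length - (i + 2)) (by omega) (i + 2) rfl]
      have e0 : strip.drop i = strip[i] :: strip[i+1] :: strip.drop (i + 2) := by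
        rw [List.drop_eq_getElem_cons (by omega), List.drop_eq_getElem_cons (by omega)]
      have e2 : strip.drop (i + 2) = strip[i+2] :: strip[i+3] :: strip.drop (i + 4) := by
        rw [List.drop_eq_getElem_cons (by omega), List.drop_eq_getElem_cons (by omega)]
      have g0 : PySem.List.pyGetD strip (i : Int) 0 = strip[i] := by
        rw [PySem.List.pyGetD_natCast]; exact List.getD_eq_getElem _ _ (by omega)
      have g1 : PySem.List.pyGetD strip ((i + 1 : Nat) : Int) 0 = strip[i+1] := by
        rw [PySem.List.pyGetD_natCast]; exact List.getD_eq_getElem _ _ (by omega)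
      have g2 : PySem.List.pyGetD strip ((i + 2 : Nat) : Int) 0 = strip[i+2] := by
        rw [PySem.List.pyGetD_natCast]; exact List.getD_eq_getElem _ _ (by omega)
      have g3 : PySem.List.pyGetD strip ((i + 3 : Nat) : Int) 0 = strip[i+3] := by
        rw [PySem.List.pyGetD_natCast]; exact List.getD_eq_getElem _ _ (by omega)
      rw [g0, g1, g2, g3, e0]
      conv_rhs => rw [e2]
      rw [pvGo, ← e2]
      simp [List.append_assoc]
    · rw [if_neg h1]
      by_cases h2 : i + 3 = strip.length
      · rw [if_pos h2]
        have e0 : strip.drop i = strip[i] :: strip[i+1] :: strip[i+2] :: strip.drop (i + 3) := by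
          rw [List.drop_eq_getElem_cons (by omega), List.drop_eq_getElem_cons (by omega),
              List.drop_eq_getElem_cons (by omega)]
        have e3 : strip.drop (i + 3) = [] := List.drop_eq_nil_of_le (by omega)
        have g0 : PySem.List.pyGetD strip (i : Int) 0 = strip[i] := by
          rw [PySem.List.pyGetD_natCast]; exact List.getD_eq_getElem _ _ (by omega)
        have g1 : PySem.List.pyGetD strip ((i + 1 : Nat) : Int) 0 = strip[i+1] := by
          rw [PySem.List.pyGetD_natCast]; exact List.getD_eq_getElem _ _ (by omega)
        have g2 : PySem.List.pyGetD strip ((i + 2 : Nat) : Int) 0 = strip[i+2] := by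
          rw [PySem.List.pyGetD_natCast]; exact List.getD_eq_getElem _ _ (by omega)
        rw [g0, g1, g2, e0, e3, pvGo]
      · rw [if_neg h2]
        have hd : strip.drop i = [] ∨ (∃ a, strip.drop i = [a]) ∨ (∃ a b, strip.drop i = [a, b]) := by
          have hl : (strip.drop i).length < 3 := by
            rw [List.length_drop]; omega
          rcases hdrop : strip.drop i with _ | ⟨a, _ | ⟨b, _ | ⟨c, t⟩⟩⟩
          · exact Or.inl rfl
          · exact Or.inr (Or.inl ⟨a, rfl⟩)
          · exact Or.inr (Or.inr ⟨a, b, rfl⟩)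
          · rw [hdrop] at hl; simp only [List.length_cons] at hl; omega
        rcases hd with h | ⟨a, h⟩ | ⟨a, b, h⟩ <;> rw [h] <;> simp [pvGo]

-- A's loop rephrased as a one-step structural recursion over the strip (proof helper only)
def pvGoA : List Int → Bool → List Int
  | a :: b :: c :: rest, cw =>
      (if cw then [a, c, b] else [c, a, b]) ++ pvGoA (b :: c :: rest) (!cw)
  | _, _ => []

-- indexing a cons at a shifted nonnegative index
theorem pyGetD_cons_shift (x : Int) (s : List Int) (i : Int) (h : 0 ≤ i) :
    PySem.List.pyGetD (x :: s) (i + 1) 0 = PySem.List.pyGetD s i 0 := by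
  obtain ⟨k, rfl⟩ := Int.eq_ofNat_of_zero_le h
  have : ((k : Int) + 1) = ((k + 1 : Nat) : Int) := by push_cast; ring
  rw [this, PySem.List.pyGetD_natCast, PySem.List.pyGetD_natCast]
  simp [List.getD]

-- A's fold from index a with flag c, as an accumulator-free flatMap (parity relative to a)
theorem tstl_loop (strip : List Int) (c : Bool) (a b : Int) (acc : List Int) :
    ((PySem.List.pyRange a b 1).foldl
      (fun (st : List Int × Bool) v =>
        if st.2 then
          (st.1 ++ [PySem.List.pyGetD strip (v - 2) 0, PySem.List.pyGetD strip v 0,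
                    PySem.List.pyGetD strip (v - 1) 0], !st.2)
        else
          (st.1 ++ [PySem.List.pyGetD strip v 0, PySem.List.pyGetD strip (v - 2) 0,
                    PySem.List.pyGetD strip (v - 1) 0], !st.2))
      (acc, c)).1
    = acc ++ (PySem.List.pyRange a b 1).flatMap (fun v =>
        if c == (PySem.Int.mod (v - a) 2 == 0) then
          [PySem.List.pyGetD strip (v - 2) 0, PySem.List.pyGetD strip v 0,
           PySem.List.pyGetD strip (v - 1) 0]
        else
          [PySem.List.pyGetD strip v 0, PySem.List.pyGetD strip (v - 2) 0,
           PySem.List.pyGetD strip (v - 1) 0]) := by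
  generalize hg : (b - a).toNat = n
  induction n generalizing a c acc with
  | zero =>
    rw [PySem.List.pyRange_one_eq_nil (by omega)]
    simp
  | succ n ih =>
    have hab : a < b := by omega
    rw [PySem.List.pyRange_one_cons hab]
    have h0 : PySem.Int.mod (a - a) 2 = 0 := by
      rw [PySem.Int.mod_eq_emod_of_pos (by omega)]
      omega
    have hm : ∀ w : Int, PySem.Int.mod w 2 = w % 2 := fun w =>
      PySem.Int.mod_eq_emod_of_pos (by omega)
    cases c
    · simp only [List.foldl_cons, List.flatMap_cons, h0, reduceIte,
        Bool.not_false, beq_self_eq_true, Bool.false_eq_true]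
      rw [ih true (a + 1) _ (by omega)]
      simp only [List.append_assoc]
      congr 2
      refine List.flatMap_congr ?_
      intro v _
      simp only [hm, Bool.true_beq, Bool.false_beq, Bool.not_eq_true', beq_iff_eq, beq_eq_false_iff_ne]
      split_ifs with h1 h2 <;> first | rfl | (exfalso; omega)
    · simp only [List.foldl_cons, List.flatMap_cons, h0, reduceIte,
        Bool.not_true, beq_self_eq_true]
      rw [ih false (a + 1) _ (by omega)]
      simp only [List.append_assoc]
      congr 2
      refine List.flatMap_congr ?_
      intro v _
      simp only [hm, Bool.true_beq, Bool.false_beq, Bool.not_eq_true', beq_iff_eq, beq_eq_false_iff_ne]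
      split_ifs with h1 h2 <;> first | rfl | (exfalso; omega)

-- shifting a unit-step range by one
theorem pyRange_shift (a b : Int) :
    PySem.List.pyRange (a + 1) (b + 1) 1 = (PySem.List.pyRange a b 1).map (· + 1) := by
  rw [PySem.List.pyRange_one, PySem.List.pyRange_one]
  have h : (b + 1 - (a + 1)) = b - a := by ring
  rw [h, List.map_map]
  refine List.map_congr_left ?_
  intro k _
  simp only [Function.comp_apply]
  ring

-- the flatMap form is pvGoA
theorem flatMap_eq_goA : ∀ (strip : List Int) (cw : Bool),
    (PySem.List.pyRange 2 (strip.length : Int) 1).flatMap (fun v =>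
        if cw == (PySem.Int.mod v 2 == 0) then
          [PySem.List.pyGetD strip (v - 2) 0, PySem.List.pyGetD strip v 0,
           PySem.List.pyGetD strip (v - 1) 0]
        else
          [PySem.List.pyGetD strip v 0, PySem.List.pyGetD strip (v - 2) 0,
           PySem.List.pyGetD strip (v - 1) 0])
    = pvGoA strip cw := by
  intro strip
  induction strip with
  | nil =>
    intro cw
    rw [PySem.List.pyRange_one_eq_nil (by simp)]
    simp [pvGoA]
  | cons x s ih =>
    intro cw
    rcases s with _ | ⟨y, _ | ⟨z, rest⟩⟩
    · rw [PySem.List.pyRange_one_eq_nil (by simp)]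
      simp [pvGoA]
    · rw [PySem.List.pyRange_one_eq_nil (by simp)]
      simp [pvGoA]
    · -- strip = x :: y :: z :: rest, length ≥ 3
      have hn : ((x :: y :: z :: rest).length : Int) = ((y :: z :: rest).length : Int) + 1 := by
        simp
      rw [PySem.List.pyRange_one_cons (by simp; omega)]
      rw [List.flatMap_cons]
      have h2 : PySem.Int.mod 2 2 = 0 := by
        rw [PySem.Int.mod_eq_emod_of_pos (by omega)]; decide
      have hshift : PySem.List.pyRange (2 + 1) ((x :: y :: z :: rest).length : Int) 1
          = (PySem.List.pyRange 2 (((y :: z :: rest).length : Int)) 1).map (· + 1) := by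
        rw [hn, ← pyRange_shift]
      rw [hshift, List.flatMap_map]
      have hpt : ∀ v ∈ PySem.List.pyRange 2 (((y :: z :: rest).length : Int)) 1,
          (fun v =>
            if cw == (PySem.Int.mod (v + 1) 2 == 0) then
              [PySem.List.pyGetD (x :: y :: z :: rest) (v + 1 - 2) 0, PySem.List.pyGetD (x :: y :: z :: rest) (v + 1) 0,
               PySem.List.pyGetD (x :: y :: z :: rest) (v + 1 - 1) 0]
            else
              [PySem.List.pyGetD (x :: y :: z :: rest) (v + 1) 0, PySem.List.pyGetD (x :: y :: z :: rest) (v + 1 - 2) 0,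
               PySem.List.pyGetD (x :: y :: z :: rest) (v + 1 - 1) 0]) v
          = (fun v =>
            if (!cw) == (PySem.Int.mod v 2 == 0) then
              [PySem.List.pyGetD (y :: z :: rest) (v - 2) 0, PySem.List.pyGetD (y :: z :: rest) v 0,
               PySem.List.pyGetD (y :: z :: rest) (v - 1) 0]
            else
              [PySem.List.pyGetD (y :: z :: rest) v 0, PySem.List.pyGetD (y :: z :: rest) (v - 2) 0,
               PySem.List.pyGetD (y :: z :: rest) (v - 1) 0]) v := by
        intro v hv
        rw [PySem.List.mem_pyRange_one] at hv
        have hm : ∀ w : Int, PySem.Int.mod w 2 = w % 2 := fun w =>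
          PySem.Int.mod_eq_emod_of_pos (by omega)
        have hg2 : PySem.List.pyGetD (x :: y :: z :: rest) (v + 1 - 2) 0
            = PySem.List.pyGetD (y :: z :: rest) (v - 2) 0 := by
          have : v + 1 - 2 = (v - 2) + 1 := by ring
          rw [this, pyGetD_cons_shift _ _ _ (by omega)]
        have hg0 : PySem.List.pyGetD (x :: y :: z :: rest) (v + 1) 0
            = PySem.List.pyGetD (y :: z :: rest) v 0 := by
          rw [pyGetD_cons_shift _ _ _ (by omega)]
        have hg1 : PySem.List.pyGetD (x :: y :: z :: rest) (v + 1 - 1) 0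
            = PySem.List.pyGetD (y :: z :: rest) (v - 1) 0 := by
          have : v + 1 - 1 = (v - 1) + 1 := by ring
          rw [this, pyGetD_cons_shift _ _ _ (by omega)]
        have hpar : (PySem.Int.mod (v + 1) 2 == 0) = !(PySem.Int.mod v 2 == 0) := by
          simp only [hm]
          have := Int.emod_two_eq_zero_or_one v
          rcases this with h | h
          · simp [Int.add_emod, h]
          · simp [Int.add_emod, h]
        simp only [hg0, hg1, hg2, hpar]
        cases cw <;> cases hb : (PySem.Int.mod v 2 == 0) <;> simp
      rw [List.flatMap_congr hpt, ih (!cw)]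
      -- head triple
      have hx0 : PySem.List.pyGetD (x :: y :: z :: rest) (0 : Int) 0 = x :=
        PySem.List.pyGetD_zero_cons _ _ _
      have hx1 : PySem.List.pyGetD (x :: y :: z :: rest) (2 - 1 : Int) 0 = y := by
        norm_num
        rw [show (1 : Int) = ((0 : Int) + 1) by ring, pyGetD_cons_shift _ _ _ (by omega)]
        exact PySem.List.pyGetD_zero_cons _ _ _
      have hx2 : PySem.List.pyGetD (x :: y :: z :: rest) (2 : Int) 0 = z := by
        rw [show (2 : Int) = ((1 : Int) + 1) by ring, pyGetD_cons_shift _ _ _ (by omega)]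
        rw [show (1 : Int) = ((0 : Int) + 1) by ring, pyGetD_cons_shift _ _ _ (by omega)]
        exact PySem.List.pyGetD_zero_cons _ _ _
      simp only [h2, show (2 : Int) - 2 = 0 by ring, hx0, hx1, hx2, beq_self_eq_true]
      cases cw <;> simp [pvGoA]

-- pvGoA equals Source B's two-per-step recursion
theorem goA_eq_go : ∀ (s : List Int) (cw : Bool),
    pvGoA s cw = (if cw then pvGo pvTriCw pvTriCcw s else pvGo pvTriCcw pvTriCw s)
  | a :: b :: c :: d :: rest, cw => by
      have ih := goA_eq_go (c :: d :: rest) cw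
      cases cw <;> simp_all [pvGoA, pvGo, pvTriCw, pvTriCcw]
  | [a, b, c], cw => by cases cw <;> simp [pvGoA, pvGo, pvTriCw, pvTriCcw]
  | [a, b], cw => by cases cw <;> simp [pvGoA, pvGo]
  | [a], cw => by cases cw <;> simp [pvGoA, pvGo]
  | [], cw => by cases cw <;> simp [pvGoA, pvGo]
termination_by s => s.length

-- ===== VERDICT =====
theorem triangle_strip_to_list_spec : Claim_equal_triangle_strip_to_list := by
  intro strip clockwise _
  unfold Spec_triangle_strip_to_list triangle_strip_to_list triangle_strip_to_list_alt
  rw [tstl_loop strip clockwise 2 (strip.length : Int) []]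
  simp only [List.nil_append]
  rw [goLoop_eq_go, goLoop_eq_go]
  simp only [List.drop_zero, List.nil_append]
  rw [← goA_eq_go]
  rw [← flatMap_eq_goA]
  refine List.flatMap_congr ?_
  intro v hv
  have hm : ∀ w : Int, PySem.Int.mod w 2 = w % 2 := fun w =>
    PySem.Int.mod_eq_emod_of_pos (by omega)
  have he : (v - 2) % 2 = v % 2 := by omega
  simp only [hm, he]
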